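-- pv_equiv track=rewrite | github.com/brunobord/typographeur | typographeur/__init__.py | convert_quote
-- ===== SOURCE A (Python) =====
-- def convert_quote(text):
--     in_quote = False
--     result = []
--     for c in text:
--         if c == '"':
--             # starting quote
--             if not in_quote:
--                 # Append guillemets + insecable space
--                 result.append('« ')
--                 in_quote = True
--             else:
--                 # Append insecable space + closing guillemets
--                 result.append(' »')
--                 in_quote = False
--         else:
--             result.append(c)
--     return ''.join(result)
-- ===== SOURCE B (Python) =====
-- def convert_quote(text):
--     parts = text.split('"')
--     pieces = [parts[0]]
--     for i, seg in enumerate(parts[1:]):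
--         pieces.append('\u00ab\u00a0' if i % 2 == 0 else '\u00a0\u00bb')
--         pieces.append(seg)
--     return ''.join(pieces)
-- ===== Notes on version B (the rewrite author's own statement) =====
-- stated objective: simpler
-- what changed: B splits the text on '"' once and rebuilds it by joining the segments with alternating guillemet separators chosen by index parity, instead of A's per-character loop with a boolean in_quote flag.
import Mathlib
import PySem

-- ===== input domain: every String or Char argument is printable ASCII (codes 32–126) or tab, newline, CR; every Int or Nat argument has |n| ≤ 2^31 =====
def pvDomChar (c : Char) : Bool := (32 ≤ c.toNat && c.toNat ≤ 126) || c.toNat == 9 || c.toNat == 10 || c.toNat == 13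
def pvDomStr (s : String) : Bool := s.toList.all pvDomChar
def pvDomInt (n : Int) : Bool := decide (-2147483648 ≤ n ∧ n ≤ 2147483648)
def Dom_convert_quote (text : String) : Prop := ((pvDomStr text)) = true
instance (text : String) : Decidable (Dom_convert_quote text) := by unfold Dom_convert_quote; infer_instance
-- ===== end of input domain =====

-- B replaces A's per-character loop with a boolean in_quote flag by a split on '"'
-- followed by a rebuild with alternating separators chosen by index parity (objective: simpler).

-- ===== PORT A =====
def convert_quote (text : String) : String :=
  let r := text.toList.foldl
    (fun (st : Bool × List (List Char)) c =>
      if c = '"' then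
        (if st.1 = false then (true, st.2 ++ [['«', '\u00A0']])
         else (false, st.2 ++ [['\u00A0', '»']]))
      else (st.1, st.2 ++ [[c]]))
    (false, [])
  String.ofList (PySem.Chars.join [] r.2)

-- ===== PORT B =====
-- faithful port of text.split('"') for the one-character separator '"'
def splitQ : List Char → List (List Char)
  | [] => [[]]
  | c :: cs =>
    if c = '"' then [] :: splitQ cs
    else
      match splitQ cs with
      | [] => [[c]]
      | p :: ps => (c :: p) :: ps

def convert_quote_alt (text : String) : String :=
  match splitQ text.toList with
  | [] => ""   -- unreachable: splitQ never returns []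
  | p0 :: rest =>
    let pieces := (PySem.List.enumerate rest 0).foldl
      (fun (acc : List (List Char)) p =>
        acc ++ [(if PySem.Int.mod p.1 2 == 0 then ['«', '\u00A0'] else ['\u00A0', '»']), p.2])
      [p0]
    String.ofList (PySem.Chars.join [] pieces)

-- ===== PRECONDITION & SPEC =====
def Spec_convert_quote (text : String) (out : String) : Prop := out = convert_quote_alt text
instance (text : String) (out : String) : Decidable (Spec_convert_quote text out) := by unfold Spec_convert_quote; infer_instance

-- ===== CLAIM (what is proved, stated in full; the proofs are below) =====
def Claim_equal_convert_quote : Prop := ∀ (text : String), Dom_convert_quote text → Spec_convert_quote text (convert_quote text)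

-- ===== LEMMAS AND PROOFS =====

-- the final value of A's in_quote flag after reading cs from state b
def stateA : List Char → Bool → Bool
  | [], b => b
  | c :: cs, b => stateA cs (if c = '"' then !b else b)

-- the piece list A's loop appends while reading cs from state b
def chunksA : List Char → Bool → List (List Char)
  | [], _ => []
  | c :: cs, b =>
    if c = '"' then (if b = false then ['«', '\u00A0'] else ['\u00A0', '»']) :: chunksA cs (!b)
    else [c] :: chunksA cs b

-- the alternating separator/segment piece list B builds; b = "next separator is the closing one"
def buildB : List (List Char) → Bool → List (List Char)
  | [], _ => []
  | p :: ps, b => (if b = false then ['«', '\u00A0'] else ['\u00A0', '»']) :: p :: buildB ps (!b)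

theorem chunksA_foldl (cs : List Char) (b : Bool) (acc : List (List Char)) :
    cs.foldl
      (fun (st : Bool × List (List Char)) c =>
        if c = '"' then
          (if st.1 = false then (true, st.2 ++ [['«', '\u00A0']])
           else (false, st.2 ++ [['\u00A0', '»']]))
        else (st.1, st.2 ++ [[c]]))
      (b, acc) = (stateA cs b, acc ++ chunksA cs b) := by
  induction cs generalizing b acc with
  | nil => simp [chunksA, stateA]
  | cons c cs ih =>
    by_cases hc : c = '"'
    · cases b <;> simp [hc, chunksA, stateA, List.foldl_cons, ih]
    · simp [hc, chunksA, stateA, List.foldl_cons, ih]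

theorem buildB_foldl (rest : List (List Char)) (k : Int) (acc : List (List Char)) :
    (PySem.List.enumerate rest k).foldl
      (fun (acc : List (List Char)) p =>
        acc ++ [(if PySem.Int.mod p.1 2 == 0 then ['«', '\u00A0'] else ['\u00A0', '»']), p.2])
      acc = acc ++ buildB rest (!(PySem.Int.mod k 2 == 0)) := by
  induction rest generalizing k acc with
  | nil => simp [PySem.List.enumerate_nil, buildB]
  | cons p ps ih =>
    have hflip : (PySem.Int.mod (k + 1) 2 == 0) = !(PySem.Int.mod k 2 == 0) := by
      rcases Int.emod_two_eq k with h | h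
      · have h' : (k + 1) % 2 = 1 := by omega
        simp [h, h']
      · have h' : (k + 1) % 2 = 0 := by omega
        simp [h, h']
    rw [PySem.List.enumerate_cons, List.foldl_cons, ih (k + 1), hflip]
    cases hb : (PySem.Int.mod k 2 == 0) <;> simp [buildB]

theorem splitQ_ne_nil (cs : List Char) : splitQ cs ≠ [] := by
  induction cs with
  | nil => simp [splitQ]
  | cons c cs ih =>
    by_cases hc : c = '"'
    · simp [splitQ, hc]
    · simp only [splitQ, if_neg hc]
      cases h : splitQ cs <;> simp

theorem join_nil_flatten (l : List (List Char)) : PySem.Chars.join [] l = l.flatten := by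
  induction l with
  | nil => rfl
  | cons p ps ih =>
    cases ps with
    | nil => simp [PySem.Chars.join, List.intercalate]
    | cons q qs =>
      simp only [PySem.Chars.join, List.intercalate] at *
      simp_all [List.intersperse]

theorem chunksA_eq_splitQ (cs : List Char) (b : Bool) (p0 : List Char) (ps : List (List Char))
    (h : splitQ cs = p0 :: ps) :
    (chunksA cs b).flatten = p0 ++ (buildB ps b).flatten := by
  induction cs generalizing b p0 ps with
  | nil =>
    simp [splitQ] at h
    simp [chunksA, h.1, h.2, buildB]
  | cons c cs ih =>
    by_cases hc : c = '"'
    · simp only [splitQ, if_pos hc] at h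
      obtain ⟨h0, hrest⟩ := List.cons.inj h
      obtain ⟨q0, qs, hq⟩ : ∃ q0 qs, splitQ cs = q0 :: qs := by
        cases hsq : splitQ cs with
        | nil => exact absurd hsq (splitQ_ne_nil cs)
        | cons q0 qs => exact ⟨q0, qs, rfl⟩
      rw [hq] at hrest
      simp only [chunksA, if_pos hc, List.flatten_cons, ih (!b) q0 qs hq, ← h0, ← hrest,
        buildB, List.nil_append]
    · simp only [splitQ, if_neg hc] at h
      cases hsq : splitQ cs with
      | nil => exact absurd hsq (splitQ_ne_nil cs)
      | cons q0 qs =>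
        rw [hsq] at h
        obtain ⟨h0, hrest⟩ := List.cons.inj h
        simp only [chunksA, if_neg hc, List.flatten_cons, ih b q0 qs hsq, ← h0, ← hrest]
        simp

-- ===== VERDICT (by name: the statement is the Claim_ definition above) =====
theorem convert_quote_spec : Claim_equal_convert_quote := by
  intro text _
  unfold Spec_convert_quote convert_quote convert_quote_alt
  obtain ⟨p0, ps, hq⟩ : ∃ p0 ps, splitQ text.toList = p0 :: ps := by
    cases hsq : splitQ text.toList with
    | nil => exact absurd hsq (splitQ_ne_nil _)
    | cons p0 ps => exact ⟨p0, ps, rfl⟩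
  simp only [hq, chunksA_foldl, buildB_foldl, join_nil_flatten, List.nil_append]
  have hb : (!(PySem.Int.mod 0 2 == 0)) = false := by decide
  rw [hb, chunksA_eq_splitQ text.toList false p0 ps hq]
  simp
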